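-- pv_equiv track=rewrite | github.com/saleed/LeetCode | 777.py | canTransform
-- ===== SOURCE A (Python) =====
-- def canTransform(start, end):
--     """
--     :type start: str
--     :type end: str
--     :rtype: bool
--     """
--     i=0
--     j=0
--
--     while True:
--         while i<len(start) and start[i]=='X':
--             i+=1
--         while j<len(end) and end[j]=='X':
--             j+=1
--         if i<len(start) and j<len(end):
--             if start[i]!=end[j] or (end[j]=="L" and j>i) or (end[j]=="R" and j<i):
--                 return False
--             else:
--                 i+=1
--                 j+=1
--         else:
--             break
--     return i==len(start) and j==len(end)
-- ===== SOURCE B (Python) =====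
-- def canTransform(start, end):
--     # Invariant view: sliding moves preserve the X-stripped sequence, move L's only left
--     # and R's only right; so check stripped equality, then compare the two letters'
--     # occurrence-index lists separately.
--     if start.replace('X', '') != end.replace('X', ''):
--         return False
--     sL = [i for i, c in enumerate(start) if c == 'L']
--     eL = [i for i, c in enumerate(end) if c == 'L']
--     sR = [i for i, c in enumerate(start) if c == 'R']
--     eR = [i for i, c in enumerate(end) if c == 'R']
--     return all(a >= b for a, b in zip(sL, eL)) and all(a <= b for a, b in zip(sR, eR))
-- ===== Notes on version B (the rewrite author's own statement) =====
-- stated objective: alternative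
-- what changed: Replaces A's interleaved two-pointer skip-X scan with three independent staged checks: equality of the X-stripped strings, then the 'L' occurrence-index lists compared pairwise (start >= end) and the 'R' occurrence-index lists compared pairwise (start <= end), valid because sliding moves preserve the stripped sequence while L's only move left and R's only move right.
import Mathlib
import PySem

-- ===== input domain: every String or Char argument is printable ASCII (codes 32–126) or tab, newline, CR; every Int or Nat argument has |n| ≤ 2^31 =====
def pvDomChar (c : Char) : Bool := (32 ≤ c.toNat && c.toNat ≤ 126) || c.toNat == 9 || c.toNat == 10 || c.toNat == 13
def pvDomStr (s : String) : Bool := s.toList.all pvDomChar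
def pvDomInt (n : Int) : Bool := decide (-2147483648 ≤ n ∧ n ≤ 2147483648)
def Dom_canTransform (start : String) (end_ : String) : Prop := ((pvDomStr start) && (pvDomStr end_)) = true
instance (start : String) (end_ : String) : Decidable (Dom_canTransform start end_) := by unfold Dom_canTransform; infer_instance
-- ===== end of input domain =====

-- B replaces A's interleaved two-pointer skip-X scan by three independent checks:
-- X-stripped sequence equality, then the 'L' and 'R' occurrence-index lists compared
-- separately (alternative decomposition, same O(n+m) cost).

-- ===== PORT A =====
-- inner 'while i<len and s[i]=='X': i+=1' loops of A
def pvSkipX (s : List Char) (i : Nat) : Nat :=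
  if hlt : i < s.length then
    if s[i] = 'X' then pvSkipX s (i + 1) else i
  else i
termination_by s.length - i

theorem pvSkipX_ge (s : List Char) (i : Nat) : i ≤ pvSkipX s i := by
  unfold pvSkipX
  split
  · split
    · have := pvSkipX_ge s (i + 1); omega
    · exact Nat.le_refl i
  · exact Nat.le_refl i
termination_by s.length - i

-- the outer 'while True' loop of A
def pvLoopA (s e : List Char) (i j : Nat) : Bool :=
  let i' := pvSkipX s i
  let j' := pvSkipX e j
  if h : i' < s.length ∧ j' < e.length then
    if s[i']'(by exact h.1) ≠ e[j']'(by exact h.2) ∨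
       (e[j']'(by exact h.2) = 'L' ∧ j' > i') ∨
       (e[j']'(by exact h.2) = 'R' ∧ j' < i') then
      false
    else
      pvLoopA s e (i' + 1) (j' + 1)
  else
    (i' == s.length && j' == e.length)
termination_by s.length - i
decreasing_by have := pvSkipX_ge s i; omega

def canTransform (start : String) (end_ : String) : Bool :=
  pvLoopA start.toList end_.toList 0 0

-- ===== PORT B =====
-- [i for i, c in enumerate(s) if c == target]
def pvIdxList (target : Char) (s : List Char) : List Nat :=
  ((s.zipIdx).filter (fun p => p.1 = target)).map Prod.snd

-- all(a >= b for a, b in zip(xs, ys))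
def pvAllGe (xs ys : List Nat) : Bool := (xs.zip ys).all (fun p => p.2 ≤ p.1)
-- all(a <= b for a, b in zip(xs, ys))
def pvAllLe (xs ys : List Nat) : Bool := (xs.zip ys).all (fun p => p.1 ≤ p.2)

-- s.replace('X','') comparison ported as dropping the 'X' characters — exact for a
-- single-character pattern and empty replacement.
def canTransform_alt (start : String) (end_ : String) : Bool :=
  let s := start.toList
  let e := end_.toList
  if s.filter (fun c => c ≠ 'X') ≠ e.filter (fun c => c ≠ 'X') then false
  else pvAllGe (pvIdxList 'L' s) (pvIdxList 'L' e) && pvAllLe (pvIdxList 'R' s) (pvIdxList 'R' e)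

-- ===== PRECONDITION & SPEC =====
def Spec_canTransform (start : String) (end_ : String) (out : Bool) : Prop := out = canTransform_alt start end_
instance (start : String) (end_ : String) (out : Bool) : Decidable (Spec_canTransform start end_ out) := by unfold Spec_canTransform; infer_instance

-- ===== CLAIM (what is proved, stated in full; the proofs are below) =====
def Claim_equal_canTransform : Prop := ∀ (start : String) (end_ : String), Dom_canTransform start end_ → Spec_canTransform start end_ (canTransform start end_)

-- ===== LEMMAS AND PROOFS =====

-- the non-'X' characters of s, paired with their indices
def pvPairs (s : List Char) : List (Char × Nat) :=
  (s.zipIdx).filter (fun p => p.1 ≠ 'X')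

def pvPairOk (p : (Char × Nat) × (Char × Nat)) : Bool :=
  p.1.1 == p.2.1 && (p.2.1 != 'L' || p.1.2 ≥ p.2.2) && (p.2.1 != 'R' || p.1.2 ≤ p.2.2)

def pvCheck (a b : List (Char × Nat)) : Bool :=
  if a.length ≠ b.length then false else (a.zip b).all pvPairOk

-- pairs of s with index ≥ i (what the suffix of A's scan still has to consume)
def pvPairsFrom (s : List Char) (i : Nat) : List (Char × Nat) :=
  ((s.drop i).zipIdx i).filter (fun p => p.1 ≠ 'X')

theorem pvPairsFrom_zero (s : List Char) : pvPairsFrom s 0 = pvPairs s := by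
  simp [pvPairsFrom, pvPairs]

theorem pvPairsFrom_of_ge (s : List Char) (i : Nat) (h : s.length ≤ i) :
    pvPairsFrom s i = [] := by
  simp [pvPairsFrom, List.drop_eq_nil_of_le h]

theorem pvPairsFrom_cons (s : List Char) (i : Nat) (h : i < s.length) (hx : s[i] ≠ 'X') :
    pvPairsFrom s i = (s[i], i) :: pvPairsFrom s (i + 1) := by
  unfold pvPairsFrom
  rw [List.drop_eq_getElem_cons h, List.zipIdx_cons]
  simp [hx]

theorem pvPairsFrom_skip (s : List Char) (i : Nat) (h : i < s.length) (hx : s[i] = 'X') :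
    pvPairsFrom s i = pvPairsFrom s (i + 1) := by
  unfold pvPairsFrom
  rw [List.drop_eq_getElem_cons h, List.zipIdx_cons]
  simp [hx]

theorem pvSkipX_le (s : List Char) (i : Nat) (h : i ≤ s.length) : pvSkipX s i ≤ s.length := by
  unfold pvSkipX
  split
  · split
    · rename_i h' _; exact pvSkipX_le s (i + 1) h'
    · exact h
  · exact h
termination_by s.length - i

theorem pvSkipX_stop (s : List Char) (i : Nat) :
    ¬ (pvSkipX s i < s.length ∧ s[pvSkipX s i]?.getD 'X' = 'X') := by
  unfold pvSkipX
  split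
  · split
    · exact pvSkipX_stop s (i + 1)
    · rename_i h1 h2
      intro ⟨ha, hb⟩
      exact h2 (by simpa [List.getElem?_eq_getElem h1] using hb)
  · rename_i h1
    intro ⟨ha, _⟩
    exact h1 ha
termination_by s.length - i

theorem pvPairsFrom_skipX (s : List Char) (i : Nat) :
    pvPairsFrom s (pvSkipX s i) = pvPairsFrom s i := by
  unfold pvSkipX
  split
  · split
    · rename_i h1 h2
      rw [pvPairsFrom_skipX s (i + 1), pvPairsFrom_skip s i h1 h2]
    · rfl
  · rfl
termination_by s.length - i

theorem pvPairOk_iff (cs ce : Char) (i j : Nat) :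
    pvPairOk ((cs, i), (ce, j)) = true ↔ (cs = ce ∧ (ce = 'L' → j ≤ i) ∧ (ce = 'R' → i ≤ j)) := by
  simp [pvPairOk]
  tauto

theorem pvCheck_cons (x y : (Char × Nat)) (a b : List (Char × Nat)) :
    pvCheck (x :: a) (y :: b) = (pvPairOk (x, y) && pvCheck a b) := by
  unfold pvCheck
  by_cases h : a.length = b.length
  · simp [h, Bool.and_comm]
  · simp [h]

theorem pvLoopA_eq_check (s e : List Char) (i j : Nat)
    (hi : i ≤ s.length) (hj : j ≤ e.length) :
    pvLoopA s e i j = pvCheck (pvPairsFrom s i) (pvPairsFrom e j) := by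
  rw [← pvPairsFrom_skipX s i, ← pvPairsFrom_skipX e j]
  unfold pvLoopA
  simp only []
  have hsle := pvSkipX_le s i hi
  have hele := pvSkipX_le e j hj
  have hss := pvSkipX_stop s i
  have hes := pvSkipX_stop e j
  split
  · rename_i h
    obtain ⟨h1, h2⟩ := h
    have hxs : s[pvSkipX s i] ≠ 'X' := by
      intro hx; exact hss ⟨h1, by simp [List.getElem?_eq_getElem h1, hx]⟩
    have hxe : e[pvSkipX e j] ≠ 'X' := by
      intro hx; exact hes ⟨h2, by simp [List.getElem?_eq_getElem h2, hx]⟩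
    rw [pvPairsFrom_cons s _ h1 hxs, pvPairsFrom_cons e _ h2 hxe, pvCheck_cons]
    split
    · rename_i hbad
      have hf : pvPairOk ((s[pvSkipX s i], pvSkipX s i), (e[pvSkipX e j], pvSkipX e j)) = false := by
        rw [Bool.eq_false_iff]
        intro hok
        rw [pvPairOk_iff] at hok
        obtain ⟨hc, hl, hr⟩ := hok
        rcases hbad with h | ⟨hch, hij⟩ | ⟨hch, hij⟩
        · exact h hc
        · have := hl hch; omega
        · have := hr hch; omega
      simp [hf]
    · rename_i hok
      push Not at hok
      obtain ⟨hc, hl, hr⟩ := hok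
      have ht : pvPairOk ((s[pvSkipX s i], pvSkipX s i), (e[pvSkipX e j], pvSkipX e j)) = true := by
        rw [pvPairOk_iff]
        exact ⟨hc, fun h => by have := hl h; omega, fun h => by have := hr h; omega⟩
      rw [ht, Bool.true_and]
      exact pvLoopA_eq_check s e (pvSkipX s i + 1) (pvSkipX e j + 1) h1 h2
  · rename_i h
    push Not at h
    by_cases h1 : pvSkipX s i < s.length
    · have hj2 : pvSkipX e j = e.length := le_antisymm hele (h h1)
      have hxs : s[pvSkipX s i] ≠ 'X' := by
        intro hx; exact hss ⟨h1, by simp [List.getElem?_eq_getElem h1, hx]⟩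
      rw [pvPairsFrom_cons s _ h1 hxs, pvPairsFrom_of_ge e _ (le_of_eq hj2.symm)]
      simp [pvCheck]
      omega
    · have hi2 : pvSkipX s i = s.length := le_antisymm hsle (Nat.le_of_not_lt h1)
      rw [pvPairsFrom_of_ge s _ (le_of_eq hi2.symm)]
      by_cases h2 : pvSkipX e j < e.length
      · have hxe : e[pvSkipX e j] ≠ 'X' := by
          intro hx; exact hes ⟨h2, by simp [List.getElem?_eq_getElem h2, hx]⟩
        rw [pvPairsFrom_cons e _ h2 hxe]
        simp [pvCheck]
        omega
      · have hj2 : pvSkipX e j = e.length := le_antisymm hele (Nat.le_of_not_lt h2)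
        rw [pvPairsFrom_of_ge e _ (le_of_eq hj2.symm)]
        simp [pvCheck]
        exact ⟨hi2, hj2⟩
termination_by s.length - i
decreasing_by have := pvSkipX_ge s i; omega

-- ===== bridge: pvCheck on pair lists vs B's three staged checks =====

-- the index list of target among a pair list
def pvPairIdx (target : Char) (a : List (Char × Nat)) : List Nat :=
  (a.filter (fun p => p.1 = target)).map Prod.snd

theorem pvPairIdx_cons (target : Char) (x : Char × Nat) (a : List (Char × Nat)) :
    pvPairIdx target (x :: a) =
      if x.1 = target then x.2 :: pvPairIdx target a else pvPairIdx target a := by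
  by_cases h : x.1 = target <;> simp [pvPairIdx, h]

theorem pvMap_fst_filter {α β : Type} (q : α → Bool) (l : List (α × β)) :
    ((l.filter (fun p => q p.1)).map Prod.fst) = (l.map Prod.fst).filter q := by
  induction l with
  | nil => rfl
  | cons x t ih => by_cases h : q x.1 <;> simp [h, ih]

theorem pvMap_fst_zipIdx (s : List Char) (n : Nat) : ((s.zipIdx n).map Prod.fst) = s := by
  induction s generalizing n with
  | nil => rfl
  | cons c t ih => simp [List.zipIdx_cons, ih]

theorem pvMap_fst_pvPairs (s : List Char) :
    (pvPairs s).map Prod.fst = s.filter (fun c => c ≠ 'X') := by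
  have := pvMap_fst_filter (fun c => c ≠ 'X') (s.zipIdx 0)
  simpa [pvPairs, pvMap_fst_zipIdx] using this

theorem pvPairIdx_pvPairs (target : Char) (htx : target ≠ 'X') (s : List Char) :
    pvPairIdx target (pvPairs s) = pvIdxList target s := by
  unfold pvPairIdx pvPairs pvIdxList
  rw [List.filter_filter]
  congr 1
  apply List.filter_congr
  intro p _
  by_cases h : p.1 = target
  · simp [h, htx]
  · simp [h]

theorem pvCheck_eq_staged (a b : List (Char × Nat)) :
    pvCheck a b =
      if a.map Prod.fst ≠ b.map Prod.fst then false
      else pvAllGe (pvPairIdx 'L' a) (pvPairIdx 'L' b) &&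
           pvAllLe (pvPairIdx 'R' a) (pvPairIdx 'R' b) := by
  induction a generalizing b with
  | nil =>
    cases b with
    | nil => rfl
    | cons y tb => simp [pvCheck]
  | cons x ta ih =>
    cases b with
    | nil => simp [pvCheck]
    | cons y tb =>
      obtain ⟨cs, i⟩ := x
      obtain ⟨ce, j⟩ := y
      rw [pvCheck_cons, ih]
      by_cases hc : cs = ce
      · subst hc
        by_cases hm : ta.map Prod.fst = tb.map Prod.fst
        · simp only [hm, ne_eq, not_true_eq_false, if_false]
          rw [pvPairIdx_cons, pvPairIdx_cons, pvPairIdx_cons, pvPairIdx_cons]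
          by_cases hL : cs = 'L'
          · subst hL
            simp [pvPairOk, pvAllGe, hm, Bool.and_assoc]
          · by_cases hR : cs = 'R'
            · subst hR
              simp [pvPairOk, pvAllLe, pvAllGe, hm, Bool.and_left_comm]
            · have hbL : (cs != 'L') = true := by simp [hL]
              have hbR : (cs != 'R') = true := by simp [hR]
              simp [pvPairOk, hm, hL, hR, hbL, hbR]
        · have : ¬ ((cs :: ta.map Prod.fst) = cs :: tb.map Prod.fst) := by
            simp [hm]
          simp [hm, this]
      · have hok : pvPairOk ((cs, i), (ce, j)) = false := by
          rw [Bool.eq_false_iff]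
          intro h
          exact hc ((pvPairOk_iff cs ce i j).mp h).1
        have : ¬ ((cs :: ta.map Prod.fst) = ce :: tb.map Prod.fst) := by simp [hc]
        simp [hok, this]

-- ===== VERDICT (by name: the statement is the Claim_ definition above) =====
theorem canTransform_spec : Claim_equal_canTransform := by
  intro start end_ _
  unfold Spec_canTransform canTransform canTransform_alt
  rw [pvLoopA_eq_check _ _ 0 0 (Nat.zero_le _) (Nat.zero_le _),
      pvPairsFrom_zero, pvPairsFrom_zero, pvCheck_eq_staged,
      pvMap_fst_pvPairs, pvMap_fst_pvPairs,
      pvPairIdx_pvPairs 'L' (by decide), pvPairIdx_pvPairs 'L' (by decide),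
      pvPairIdx_pvPairs 'R' (by decide), pvPairIdx_pvPairs 'R' (by decide)]
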